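-- pv_equiv track=rewrite | github.com/pacokwon/cs372-nlp | hw3/CS372_HW3_code_20190046.py | num_of_words
-- ===== SOURCE A (Python) =====
-- def num_of_words(word_pos_tuples):
--     """
--     Get the number of distinct words from the list of tuples
--
--     for example the argument might look something like:
--     [(wind, NN), (wind, VB), (tear, NN), (tear, VB), (wind, VB)]
--     then the result of the function would be 4, since there are
--     4 distinct words in this list
--
--     :param word_pos_tuples: list of tuples, where the first element
--                             is a word, and the second element is its POS
--     :type word_pos_tuples: list of tuples
--     :returns: number of distinct words from the list of tuples
--     :rtype: int
--     """
--     pos_dict = {}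
--     for word, pos in word_pos_tuples:
--         if word not in pos_dict:
--             pos_dict[word] = {pos}
--         else:
--             pos_dict[word].add(pos)
--
--     return sum(len(pos_dict[key]) for key in pos_dict)
-- ===== SOURCE B (Python) =====
-- def num_of_words(word_pos_tuples):
--     seen = set()
--     for word, pos in word_pos_tuples:
--         seen.add((word, pos))
--     return len(seen)
-- ===== Notes on version B (the rewrite author's own statement) =====
-- stated objective: simpler
-- what changed: Replaces the dict-of-sets grouping plus a summing generator over the dict's keys with one flat set of (word, pos) pairs built in a single pass, returning its size.
import Mathlib
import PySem

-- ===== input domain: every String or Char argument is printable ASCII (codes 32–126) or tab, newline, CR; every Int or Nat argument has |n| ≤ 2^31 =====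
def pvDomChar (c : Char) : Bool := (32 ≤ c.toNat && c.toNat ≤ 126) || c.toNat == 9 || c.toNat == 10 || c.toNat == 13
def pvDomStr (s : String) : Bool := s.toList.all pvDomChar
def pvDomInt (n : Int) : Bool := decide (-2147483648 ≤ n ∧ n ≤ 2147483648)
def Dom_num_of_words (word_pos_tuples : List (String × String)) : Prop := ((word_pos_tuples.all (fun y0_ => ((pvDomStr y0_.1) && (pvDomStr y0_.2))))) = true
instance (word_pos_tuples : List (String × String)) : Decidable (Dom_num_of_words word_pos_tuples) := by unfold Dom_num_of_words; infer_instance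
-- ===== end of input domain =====

-- B replaces A's dict-of-sets grouping plus a summing generator with one flat set of
-- (word, pos) pairs built in a single pass (objective: simpler).

-- ===== PORT A =====
def num_of_words (word_pos_tuples : List (String × String)) : Int :=
  let pos_dict : PySem.Dict String (PySem.Set String) :=
    word_pos_tuples.foldl (fun d wp =>
      if d.contains wp.1 = false then
        d.insert wp.1 (PySem.Set.ofList [wp.2])
      else
        -- pos_dict[word].add(pos): in-place set add, modelled as Dict.modify
        d.modify wp.1 PySem.Set.empty (fun st => PySem.Set.add st wp.2))
      PySem.Dict.empty
  (pos_dict.keys.map (fun key => PySem.Set.len (pos_dict.getD key PySem.Set.empty))).sum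

-- ===== PORT B =====
def num_of_words_alt (word_pos_tuples : List (String × String)) : Int :=
  PySem.Set.len
    (word_pos_tuples.foldl (fun seen wp => PySem.Set.add seen (wp.1, wp.2)) PySem.Set.empty)

-- ===== PRECONDITION & SPEC =====
def Spec_num_of_words (word_pos_tuples : List (String × String)) (out : Int) : Prop := out = num_of_words_alt word_pos_tuples
instance (word_pos_tuples : List (String × String)) (out : Int) : Decidable (Spec_num_of_words word_pos_tuples out) := by unfold Spec_num_of_words; infer_instance

-- ===== CLAIM (what is proved, stated in full; the proofs are below) =====
def Claim_equal_num_of_words : Prop := ∀ (word_pos_tuples : List (String × String)), Dom_num_of_words word_pos_tuples → Spec_num_of_words word_pos_tuples (num_of_words word_pos_tuples)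

-- ===== LEMMAS AND PROOFS =====

-- A's loop step and the summed length of A's dict, named for the proofs.
def pvStepA (d : PySem.Dict String (PySem.Set String)) (wp : String × String) :
    PySem.Dict String (PySem.Set String) :=
  if d.contains wp.1 = false then
    d.insert wp.1 (PySem.Set.ofList [wp.2])
  else
    d.modify wp.1 PySem.Set.empty (fun st => PySem.Set.add st wp.2)

def pvSumLens (d : PySem.Dict String (PySem.Set String)) : Int :=
  (d.keys.map (fun key => PySem.Set.len (d.getD key PySem.Set.empty))).sum

lemma pv_len_add (s : PySem.Set (String × String)) (x : String × String) :
    PySem.Set.len (s.add x) = if x ∈ s then PySem.Set.len s else PySem.Set.len s + 1 := by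
  simp [PySem.Set.add, PySem.Set.len]
  split_ifs <;> simp_all

lemma pv_len_add_str (s : PySem.Set String) (x : String) :
    PySem.Set.len (s.add x) = if x ∈ s then PySem.Set.len s else PySem.Set.len s + 1 := by
  simp [PySem.Set.add, PySem.Set.len]
  split_ifs <;> simp_all

-- sum over a nodup list when the function changes at exactly one element
lemma pv_sum_map_update (l : List String) (f g : String → Int) (k : String)
    (hk : k ∈ l) (hnd : l.Nodup) (h : ∀ x ∈ l, x ≠ k → g x = f x) :
    (l.map g).sum = (l.map f).sum + (g k - f k) := by
  induction l with
  | nil => cases hk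
  | cons a t ih =>
    rcases List.mem_cons.mp hk with rfl | hkt
    · have : ∀ x ∈ t, g x = f x := by
        intro x hx
        exact h x (List.mem_cons_of_mem _ hx) (fun hxa => (List.nodup_cons.mp hnd).1 (hxa ▸ hx))
      simp [List.map_congr_left this]
      ring
    · have hak : a ≠ k := fun hak => (List.nodup_cons.mp hnd).1 (hak ▸ hkt)
      have := ih hkt (List.nodup_cons.mp hnd).2 (fun x hx => h x (List.mem_cons_of_mem _ hx))
      simp [this, h a (List.mem_cons_self) hak]
      ring

-- main loop invariant: the dict's summed set sizes track B's flat set size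
lemma pv_loop (l : List (String × String)) :
    ∀ (d : PySem.Dict String (PySem.Set String)) (s : PySem.Set (String × String)),
    d.keys.Nodup →
    (∀ w p, (w, p) ∈ s ↔ p ∈ d.getD w PySem.Set.empty) →
    pvSumLens d = PySem.Set.len s →
    pvSumLens (l.foldl pvStepA d) =
      PySem.Set.len (l.foldl (fun seen wp => PySem.Set.add seen (wp.1, wp.2)) s) := by
  induction l with
  | nil => intro d s _ _ h; simpa using h
  | cons wp t ih =>
    intro d s hnd hmem hsum
    obtain ⟨w, p⟩ := wp
    simp only [List.foldl_cons]
    by_cases hc : d.contains w = true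
    · -- existing word: A adds p to its set, B adds the pair
      have hstep : pvStepA d (w, p) = d.modify w PySem.Set.empty (fun st => PySem.Set.add st p) := by
        simp [pvStepA, hc]
      rw [hstep]
      apply ih
      · rw [PySem.Dict.keys_modify, PySem.Dict.keys_insert_of_contains d _ hc]; exact hnd
      · intro w' p'
        rw [PySem.Set.mem_add, PySem.Dict.getD_modify]
        by_cases hww : w' = w
        · subst hww
          simp only [if_true, PySem.Set.mem_add, Prod.mk.injEq, true_and]
          rw [hmem w' p']
        · simp only [if_neg hww, Prod.mk.injEq]
          rw [hmem w' p']
          constructor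
          · rintro (h | ⟨rfl, rfl⟩)
            · exact h
            · exact absurd rfl hww
          · exact fun h => Or.inl h
      · -- size accounting: both sides grow by the same 0/1
        have hkmem : w ∈ d.keys := (PySem.Dict.contains_iff_mem_keys d w).mp hc
        have hkeys : (d.modify w PySem.Set.empty (fun st => PySem.Set.add st p)).keys = d.keys := by
          rw [PySem.Dict.keys_modify, PySem.Dict.keys_insert_of_contains d _ hc]
        have hpair : (w, p) ∈ s ↔ p ∈ d.getD w PySem.Set.empty := hmem w p
        unfold pvSumLens
        rw [hkeys]
        rw [pv_sum_map_update d.keys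
              (fun key => PySem.Set.len (d.getD key PySem.Set.empty))
              (fun key => PySem.Set.len ((d.modify w PySem.Set.empty (fun st => PySem.Set.add st p)).getD key PySem.Set.empty))
              w hkmem hnd
              (by intro x _ hx; simp [PySem.Dict.getD_modify, hx])]
        unfold pvSumLens at hsum
        rw [hsum]
        simp only [PySem.Dict.getD_modify, if_true]
        rw [pv_len_add, pv_len_add_str]
        by_cases hp : (w, p) ∈ s
        · rw [if_pos hp, if_pos (hpair.mp hp)]; ring
        · rw [if_neg hp, if_neg (fun h => hp (hpair.mpr h))]; ring
    · -- new word: A inserts a fresh singleton set, B adds a new pair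
      have hc' : d.contains w = false := by simpa using hc
      have hstep : pvStepA d (w, p) = d.insert w (PySem.Set.ofList [p]) := by
        simp [pvStepA, hc']
      have hgd : d.getD w PySem.Set.empty = PySem.Set.empty :=
        PySem.Dict.getD_of_not_contains d _ hc'
      have hwk : w ∉ d.keys := by
        intro h; simp [(PySem.Dict.contains_iff_mem_keys d w).mpr h] at hc'
      have hpairnew : ¬ (w, p) ∈ s := fun h => by
        have := (hmem w p).mp h; rw [hgd] at this; simp [PySem.Set.empty] at this
      rw [hstep]
      apply ih
      · rw [PySem.Dict.keys_insert_of_not_contains d _ hc']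
        simp [List.nodup_append, hnd]
        intro a ha hak
        exact hwk (hak ▸ ha)
      · intro w' p'
        rw [PySem.Set.mem_add, PySem.Dict.getD_insert]
        by_cases hww : w' = w
        · subst hww
          have hns : ¬ (w', p') ∈ s := fun h => by
            have := (hmem w' p').mp h; rw [hgd] at this; simp [PySem.Set.empty] at this
          simp only [if_true, Prod.mk.injEq, true_and]
          simp [PySem.Set.ofList, PySem.Set.add, PySem.Set.empty, hns]
        · simp only [if_neg hww, Prod.mk.injEq]
          rw [hmem w' p']
          constructor
          · rintro (h | ⟨rfl, rfl⟩)
            · exact h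
            · exact absurd rfl hww
          · exact fun h => Or.inl h
      · -- both sums grow by exactly 1
        unfold pvSumLens
        rw [PySem.Dict.keys_insert_of_not_contains d _ hc']
        have hmap : d.keys.map (fun key => PySem.Set.len ((d.insert w (PySem.Set.ofList [p])).getD key PySem.Set.empty))
            = d.keys.map (fun key => PySem.Set.len (d.getD key PySem.Set.empty)) := by
          apply List.map_congr_left
          intro x hx
          have : x ≠ w := fun hxw => hwk (hxw ▸ hx)
          simp [PySem.Dict.getD_insert, this]
        rw [List.map_append, List.sum_append, hmap]
        rw [pv_len_add, if_neg hpairnew]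
        unfold pvSumLens at hsum
        rw [hsum]
        simp [PySem.Dict.getD_insert, PySem.Set.ofList, PySem.Set.add, PySem.Set.empty, PySem.Set.len]

-- ===== VERDICT (by name: the statement is the Claim_ definition above) =====
theorem num_of_words_spec : Claim_equal_num_of_words := by
  intro l _
  unfold Spec_num_of_words num_of_words num_of_words_alt
  have := pv_loop l PySem.Dict.empty PySem.Set.empty
    (by simp [PySem.Dict.empty, PySem.Dict.keys])
    (by intro w p; simp [PySem.Set.empty, PySem.Dict.getD_empty])
    (by simp [pvSumLens, PySem.Dict.empty, PySem.Dict.keys, PySem.Set.len, PySem.Set.empty])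
  simp only [pvSumLens] at this
  exact this
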